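-- pv_equiv track=rewrite | github.com/omritriki/espresso-py | src/espresso.py | generate_minterms
-- ===== SOURCE A (Python) =====
-- def generate_minterms(bits: list) -> list:
--     """Generate all minterms covered by a cube with don't-cares."""
--     minterms = ['']
--
--     for bit in bits:
--         if bit == '-':
--             # For don't-care, double the current minterms with 0 and 1
--             new_minterms = []
--             for minterm in minterms:
--                 new_minterms.append(minterm + '0')
--                 new_minterms.append(minterm + '1')
--             minterms = new_minterms
--         else:
--             # For specific value, append to all current minterms
--             minterms = [minterm + bit for minterm in minterms]
--
--     return minterms
-- ===== SOURCE B (Python) =====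
-- def generate_minterms(bits: list) -> list:
--     """Generate all minterms covered by a cube with don't-cares."""
--     k = sum(bit == '-' for bit in bits)
--     out = []
--     for n in range(2 ** k):
--         s = ''
--         r = n
--         p = k
--         for bit in bits:
--             if bit == '-':
--                 p -= 1
--                 d = r // (2 ** p)
--                 s += '0' if d == 0 else '1'
--                 r -= d * (2 ** p)
--             else:
--                 s += bit
--         out.append(s)
--     return out
-- ===== Notes on version B (the rewrite author's own statement) =====
-- stated objective: faster
-- what changed: B first counts the k don't-cares, then generates each minterm independently from an integer counter n in range(2**k), decoding n's binary digits MSB-first by floor division while scanning the bits once per n and growing one string, instead of A's pass that rebuilds the whole list of partial strings (reallocating every partial string) at each bit.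
import Mathlib
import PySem

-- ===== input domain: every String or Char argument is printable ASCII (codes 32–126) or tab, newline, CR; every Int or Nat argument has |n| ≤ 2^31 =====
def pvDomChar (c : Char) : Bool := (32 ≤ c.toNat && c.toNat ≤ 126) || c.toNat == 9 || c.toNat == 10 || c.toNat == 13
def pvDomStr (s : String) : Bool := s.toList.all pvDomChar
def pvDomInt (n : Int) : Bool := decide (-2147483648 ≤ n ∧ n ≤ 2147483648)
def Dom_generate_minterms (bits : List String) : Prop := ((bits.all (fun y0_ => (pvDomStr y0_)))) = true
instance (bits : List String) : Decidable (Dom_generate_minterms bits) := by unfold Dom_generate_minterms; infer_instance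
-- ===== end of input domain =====

-- B generates each minterm independently from an integer counter 0..2^k-1 (decoding its binary digits MSB-first at the don't-care positions) instead of A's incremental list-doubling that reallocates every partial string at each bit; objective: faster (measured).


-- ===== PORT A =====
def generate_minterms (bits : List String) : List String :=
  bits.foldl (fun minterms bit =>
    if bit = "-" then
      minterms.foldl (fun new_minterms minterm =>
        (new_minterms ++ [minterm ++ "0"]) ++ [minterm ++ "1"]) []
    else
      minterms.map (fun minterm => minterm ++ bit)) [""]

-- ===== PORT B =====
-- k = sum(bit == '-' for bit in bits): a sum of booleans, i.e. a count.
-- p starts at k and is decremented exactly once per don't-care, so it never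
-- goes below 0 and Nat subtraction is exact here.
def generate_minterms_alt (bits : List String) : List String :=
  let k : Nat := bits.countP (fun bit => bit = "-")
  (PySem.List.pyRange 0 (2 ^ k) 1).map (fun n =>
    (bits.foldl (fun (st : String × Int × Nat) bit =>
      if bit = "-" then
        let p := st.2.2 - 1
        let d := PySem.Int.floordiv st.2.1 (2 ^ p)
        (st.1 ++ (if d = 0 then "0" else "1"), st.2.1 - d * 2 ^ p, p)
      else
        (st.1 ++ bit, st.2.1, st.2.2)) ("", n, k)).1)

-- ===== PRECONDITION & SPEC =====
def Spec_generate_minterms (bits : List String) (out : List String) : Prop := out = generate_minterms_alt bits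
instance (bits : List String) (out : List String) : Decidable (Spec_generate_minterms bits out) := by unfold Spec_generate_minterms; infer_instance

-- ===== CLAIM (what is proved, stated in full; the proofs are below) =====
def Claim_equal_generate_minterms : Prop := ∀ (bits : List String), Dom_generate_minterms bits → Spec_generate_minterms bits (generate_minterms bits)

-- ===== LEMMAS AND PROOFS =====

-- Reference form: the list of minterms as a structural recursion over bits.
def pvG (bits : List String) : List String :=
  bits.foldr (fun bit result =>
    (if bit = "-" then ["0", "1"] else [bit]).flatMap (fun c =>
      result.map (fun s => c ++ s))) [""]

-- The string B builds for counter value r with p don't-cares remaining.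
def pvF : List String → Int → Nat → String
  | [], _, _ => ""
  | b :: t, r, p =>
    if b = "-" then
      let p' := p - 1
      let d := PySem.Int.floordiv r (2 ^ p')
      (if d = 0 then "0" else "1") ++ pvF t (r - d * 2 ^ p') p'
    else
      b ++ pvF t r p

-- ---- A = pvG ----
theorem inner_foldl (ms acc : List String) :
    ms.foldl (fun new_minterms minterm =>
        (new_minterms ++ [minterm ++ "0"]) ++ [minterm ++ "1"]) acc
      = acc ++ ms.flatMap (fun m => [m ++ "0", m ++ "1"]) := by
  induction ms generalizing acc with
  | nil => simp
  | cons b t ih => simp [List.foldl_cons, List.flatMap_def]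

theorem a_loop_invariant (bits acc : List String) :
    bits.foldl (fun minterms bit =>
      if bit = "-" then
        minterms.foldl (fun new_minterms minterm =>
          (new_minterms ++ [minterm ++ "0"]) ++ [minterm ++ "1"]) []
      else
        minterms.map (fun minterm => minterm ++ bit)) acc
    = acc.flatMap (fun m => (pvG bits).map (fun s => m ++ s)) := by
  induction bits generalizing acc with
  | nil => simp [pvG]
  | cons b t ih =>
    rw [List.foldl_cons, ih]
    by_cases hb : b = "-"
    · rw [if_pos hb, inner_foldl, List.nil_append, List.flatMap_assoc]
      refine congrArg (List.flatMap · acc) (funext fun m => ?_)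
      simp [pvG, hb, List.flatMap_def, List.map_map, Function.comp_def, String.append_assoc]
    · rw [if_neg hb, List.flatMap_map]
      refine congrArg (List.flatMap · acc) (funext fun m => ?_)
      simp [pvG, hb, List.flatMap_def, List.map_map, Function.comp_def, String.append_assoc]

theorem a_eq_pvG (bits : List String) : generate_minterms bits = pvG bits := by
  unfold generate_minterms
  rw [a_loop_invariant]
  simp

-- ---- B's inner fold builds pvF ----
theorem b_inner_fold (bits : List String) (s : String) (r : Int) (p : Nat) :
    (bits.foldl (fun (st : String × Int × Nat) bit =>
      if bit = "-" then
        let p := st.2.2 - 1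
        let d := PySem.Int.floordiv st.2.1 (2 ^ p)
        (st.1 ++ (if d = 0 then "0" else "1"), st.2.1 - d * 2 ^ p, p)
      else
        (st.1 ++ bit, st.2.1, st.2.2)) (s, r, p)).1 = s ++ pvF bits r p := by
  induction bits generalizing s r p with
  | nil => simp [pvF]
  | cons b t ih =>
    rw [List.foldl_cons]
    by_cases hb : b = "-"
    · subst hb
      rw [if_pos rfl, ih]
      simp [pvF, String.append_assoc]
    · rw [if_neg hb, ih]
      simp only [pvF, hb, reduceIte]
      rw [String.append_assoc]

-- floor division facts on the Nat-cast range elements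
theorem floordiv_lo (m k : Nat) (h : m < 2 ^ k) :
    PySem.Int.floordiv (Int.ofNat m) ((2 : Int) ^ k) = 0 := by
  have h2 : ((2 : Int) ^ k) = ((2 ^ k : Nat) : Int) := by push_cast; ring
  rw [show Int.ofNat m = ((m : Nat) : Int) from rfl, h2, PySem.Int.floordiv_natCast,
    Nat.div_eq_of_lt h]
  simp

theorem floordiv_hi (j k : Nat) (h : j < 2 ^ k) :
    PySem.Int.floordiv (Int.ofNat (2 ^ k + j)) ((2 : Int) ^ k) = 1 := by
  have h2 : ((2 : Int) ^ k) = ((2 ^ k : Nat) : Int) := by push_cast; ring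
  rw [show Int.ofNat (2 ^ k + j) = ((2 ^ k + j : Nat) : Int) from rfl, h2,
    PySem.Int.floordiv_natCast]
  have h3 : (2 ^ k + j) / 2 ^ k = 1 := by
    rw [Nat.add_comm, Nat.add_div_right _ (Nat.two_pow_pos k), Nat.div_eq_of_lt h]
  rw [h3]
  simp

-- ---- the counter pass produces exactly pvG ----
theorem counter_eq_pvG (bits : List String) :
    (List.range (2 ^ bits.countP (fun bit => bit = "-"))).map
      (fun (m : Nat) => pvF bits (Int.ofNat m) (bits.countP (fun bit => bit = "-")))
    = pvG bits := by
  induction bits with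
  | nil => simp [pvF, pvG]
  | cons b t ih =>
    by_cases hb : b = "-"
    · have hk : (b :: t).countP (fun bit => bit = "-")
          = t.countP (fun bit => bit = "-") + 1 := by
        simp [hb]
      set k := t.countP (fun bit => bit = "-") with hkdef
      rw [hk]
      have hsplit : (2 : Nat) ^ (k + 1) = 2 ^ k + 2 ^ k := by ring
      rw [hsplit, List.range_add, List.map_append, List.map_map]
      have hlo : (List.range (2 ^ k)).map (fun (m : Nat) => pvF (b :: t) (Int.ofNat m) (k + 1))
          = (List.range (2 ^ k)).map (fun (m : Nat) => "0" ++ pvF t (Int.ofNat m) k) := by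
        apply List.map_congr_left
        intro m hm
        rw [List.mem_range] at hm
        simp only [pvF, hb]
        rw [show k + 1 - 1 = k from rfl, floordiv_lo m k hm]
        simp
      have hhi : (List.range (2 ^ k)).map
            ((fun (m : Nat) => pvF (b :: t) (Int.ofNat m) (k + 1)) ∘ (fun x => 2 ^ k + x))
          = (List.range (2 ^ k)).map (fun (j : Nat) => "1" ++ pvF t (Int.ofNat j) k) := by
        apply List.map_congr_left
        intro j hj
        rw [List.mem_range] at hj
        simp only [Function.comp_apply, pvF, hb]
        rw [show k + 1 - 1 = k from rfl, floordiv_hi j k hj]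
        have hsub : Int.ofNat (2 ^ k + j) - 1 * (2 : Int) ^ k = Int.ofNat j := by
          simp only [Int.ofNat_eq_natCast]; push_cast; ring
        rw [hsub]
        simp
      rw [hlo, hhi]
      simp only [pvG, List.foldr_cons, hb]
      rw [show t.foldr (fun bit result =>
        (if bit = "-" then ["0", "1"] else [bit]).flatMap (fun c =>
          result.map (fun s => c ++ s))) [""] = pvG t from rfl, ← ih]
      simp [List.flatMap_def, List.map_map, Function.comp_def]
    · have hk : (b :: t).countP (fun bit => bit = "-")
          = t.countP (fun bit => bit = "-") := by
        simp [hb]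
      rw [hk]
      have hcong : (List.range (2 ^ t.countP (fun bit => bit = "-"))).map
          (fun (m : Nat) => pvF (b :: t) (Int.ofNat m) (t.countP (fun bit => bit = "-")))
          = (List.range (2 ^ t.countP (fun bit => bit = "-"))).map
          (fun (m : Nat) => b ++ pvF t (Int.ofNat m) (t.countP (fun bit => bit = "-"))) := by
        apply List.map_congr_left
        intro m _
        simp [pvF, hb]
      rw [hcong]
      simp only [pvG, List.foldr_cons, hb]
      rw [show t.foldr (fun bit result =>
        (if bit = "-" then ["0", "1"] else [bit]).flatMap (fun c =>
          result.map (fun s => c ++ s))) [""] = pvG t from rfl, ← ih]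
      simp [List.flatMap_def, List.map_map, Function.comp_def]

theorem alt_eq_pvG (bits : List String) : generate_minterms_alt bits = pvG bits := by
  simp only [generate_minterms_alt]
  rw [PySem.List.pyRange_one]
  have h2 : (((2 : Int) ^ bits.countP (fun bit => bit = "-") - 0)).toNat
      = 2 ^ bits.countP (fun bit => bit = "-") := by
    simp
    exact_mod_cast rfl
  rw [h2, List.map_map]
  rw [← counter_eq_pvG bits]
  apply List.map_congr_left
  intro m _
  simp only [Function.comp_apply, b_inner_fold]
  simp [Int.ofNat_eq_natCast]

-- ===== VERDICT (by name: the statement is the Claim_ definition above) =====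
theorem generate_minterms_spec : Claim_equal_generate_minterms := by
  intro bits _
  unfold Spec_generate_minterms
  rw [a_eq_pvG, alt_eq_pvG]
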